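-- pv_equiv track=rewrite | github.com/dagster-io/dagster | python_modules/libraries/dagster-shared/dagster_shared/seven/__init__.py | match_module_pattern
-- ===== SOURCE A (Python) =====
-- def match_module_pattern(module_name: str, pattern: str) -> bool:
--     """Check if a module name matches a given pattern."""
--     pattern_segments = pattern.split(".")
--     module_segments = module_name.split(".")
--
--     if len(pattern_segments) != len(module_segments):
--         return False
--
--     for pattern_segment, module_segment in zip(pattern_segments, module_segments):
--         if pattern_segment != "*" and pattern_segment != module_segment:
--             return False
--
--     return True
-- ===== SOURCE B (Python) =====
-- def match_module_pattern(module_name: str, pattern: str) -> bool: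
--     """Single left-to-right scan of both strings in lockstep (no splitting):
--     a '*' forming a whole pattern segment skips the current module segment;
--     otherwise characters (including the separating dots) must match one by one."""
--     m, p = module_name, pattern
--     n, k = len(m), len(p)
--     i = j = 0
--     at_segment_start = True
--     while True:
--         # wildcard: pattern's current segment is exactly '*'
--         if at_segment_start and j < k and p[j] == '*' and (j + 1 == k or p[j + 1] == '.'):
--             j += 1
--             while i < n and m[i] != '.':
--                 i += 1
--         if i == n and j == k:
--             return True
--         if i < n and j < k and m[i] == p[j]:
--             at_segment_start = m[i] == '.'
--             i += 1
--             j += 1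
--             continue
--         return False
-- ===== Notes on version B (the rewrite author's own statement) =====
-- stated objective: alternative
-- what changed: A splits both strings into segment lists, compares lengths and zips them; B never splits: it does a single left-to-right lockstep character scan of both strings, skipping a module segment when the pattern's current segment is exactly '*'.
import Mathlib
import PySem

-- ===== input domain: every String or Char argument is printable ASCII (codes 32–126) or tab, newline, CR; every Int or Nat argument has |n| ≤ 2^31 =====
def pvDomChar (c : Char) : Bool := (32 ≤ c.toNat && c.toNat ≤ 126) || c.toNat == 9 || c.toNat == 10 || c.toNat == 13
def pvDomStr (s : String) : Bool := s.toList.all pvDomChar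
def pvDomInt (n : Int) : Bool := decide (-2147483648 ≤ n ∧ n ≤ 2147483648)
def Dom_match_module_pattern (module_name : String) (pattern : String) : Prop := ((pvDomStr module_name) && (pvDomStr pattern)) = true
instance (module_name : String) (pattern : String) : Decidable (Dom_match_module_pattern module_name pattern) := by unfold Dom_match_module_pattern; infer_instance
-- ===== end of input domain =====

-- B replaces A's split-into-segments + length check + zipped comparison loop by a single
-- lockstep character scan of both strings with a wildcard-segment skip (objective: alternative).

-- ===== PORT A =====
-- A's for-loop over the zipped segment lists, with its early 'return False'
def pyLoopA : List (String × String) → Bool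
  | [] => true
  | (ps, ms) :: rest => if ps ≠ "*" ∧ ps ≠ ms then false else pyLoopA rest

def match_module_pattern (module_name : String) (pattern : String) : Bool :=
  let pattern_segments := (PySem.Str.split? pattern ".").getD []
  let module_segments := (PySem.Str.split? module_name ".").getD []
  if pattern_segments.length ≠ module_segments.length then false
  else pyLoopA (pattern_segments.zip module_segments)

-- ===== PORT B =====
def isWildSeg : List Char → Bool
  | '*' :: [] => true
  | '*' :: '.' :: _ => true
  | _ => false
def skipSeg : List Char → List Char
  | [] => []
  | c :: cs => if c = '.' then c :: cs else skipSeg cs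
theorem skipSeg_length_le (l : List Char) : (skipSeg l).length ≤ l.length := by
  induction l with
  | nil => simp [skipSeg]
  | cons c cs ih => simp only [skipSeg]; split <;> simp <;> omega
mutual
  def scan (m p : List Char) (atStart : Bool) : Bool :=
    if atStart && isWildSeg p then scanGo (skipSeg m) p.tail else scanGo m p
  termination_by 2 * (m.length + p.length) + 1
  decreasing_by
    · have := skipSeg_length_le m
      have : p.tail.length ≤ p.length := by cases p <;> simp
      omega
    · omega
  def scanGo (m p : List Char) : Bool :=
    match m, p with
    | [], [] => true
    | mc :: mr, pc :: pr => if mc = pc then scan mr pr (decide (mc = '.')) else false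
    | _, _ => false
  termination_by 2 * (m.length + p.length)
  decreasing_by simp; omega
end

def match_module_pattern_alt (module_name : String) (pattern : String) : Bool :=
  scan module_name.toList pattern.toList true

-- ===== PRECONDITION & SPEC =====
def Spec_match_module_pattern (module_name : String) (pattern : String) (out : Bool) : Prop := out = match_module_pattern_alt module_name pattern
instance (module_name : String) (pattern : String) (out : Bool) : Decidable (Spec_match_module_pattern module_name pattern out) := by unfold Spec_match_module_pattern; infer_instance

-- ===== CLAIM (what is proved, stated in full; the proofs are below) =====
def Claim_equal_match_module_pattern : Prop := ∀ (module_name : String) (pattern : String), Dom_match_module_pattern module_name pattern → Spec_match_module_pattern module_name pattern (match_module_pattern module_name pattern)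

-- ===== LEMMAS AND PROOFS =====

def segs : List Char → List Char → List (List Char)
  | cur, [] => [cur.reverse]
  | cur, c :: r => if c = '.' then cur.reverse :: segs [] r else segs (c :: cur) r
def segMatch : List (List Char) → List (List Char) → Bool
  | [], [] => true
  | p :: ps, m :: ms => (decide (p = ['*']) || decide (p = m)) && segMatch ps ms
  | _, _ => false
def firstSeg (l : List Char) : List Char := l.takeWhile (· ≠ '.')
def restSeg (l : List Char) : List Char := l.dropWhile (· ≠ '.')
def segsTail (l : List Char) : List (List Char) :=
  match restSeg l with
  | [] => []
  | _ :: t => segs [] t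
theorem segs_decomp : ∀ (l cur : List Char), segs cur l = (cur.reverse ++ firstSeg l) :: segsTail l := by
  intro l
  induction l with
  | nil => intro cur; simp [segs, firstSeg, restSeg, segsTail]
  | cons c r ih =>
    intro cur
    by_cases hc : c = '.'
    · subst hc; simp [segs, firstSeg, restSeg, segsTail, List.takeWhile, List.dropWhile]
    · simp only [segs, if_neg hc]
      rw [ih (c :: cur)]
      simp [firstSeg, restSeg, segsTail, List.takeWhile_cons, List.dropWhile_cons, hc]
theorem segs_ne_nil (cur l : List Char) : segs cur l ≠ [] := by
  rw [segs_decomp]; simp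
theorem scan_false (m p : List Char) : scan m p false = scanGo m p := by
  rw [scan]; simp
theorem restSeg_cases (l : List Char) : restSeg l = [] ∨ ∃ t, restSeg l = '.' :: t := by
  induction l with
  | nil => left; rfl
  | cons c r ih =>
    by_cases hc : c = '.'
    · subst hc; right; exact ⟨r, by simp [restSeg, List.dropWhile_cons]⟩
    · simpa [restSeg, List.dropWhile_cons, hc] using ih
theorem skipSeg_eq (l : List Char) : skipSeg l = restSeg l := by
  induction l with
  | nil => rfl
  | cons c r ih =>
    by_cases hc : c = '.' <;> simp [skipSeg, restSeg, List.dropWhile_cons, hc]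
    · simpa [restSeg] using ih
theorem restSeg_length_le (l : List Char) : (restSeg l).length ≤ l.length := by
  simpa [skipSeg_eq] using skipSeg_length_le l
theorem firstSeg_cons_dot (r : List Char) : firstSeg ('.' :: r) = [] := by
  simp [firstSeg, List.takeWhile]
theorem firstSeg_cons (c : Char) (r : List Char) (hc : c ≠ '.') : firstSeg (c :: r) = c :: firstSeg r := by
  simp [firstSeg, List.takeWhile_cons, hc]
theorem restSeg_cons_dot (r : List Char) : restSeg ('.' :: r) = '.' :: r := by
  simp [restSeg, List.dropWhile_cons]
theorem restSeg_cons (c : Char) (r : List Char) (hc : c ≠ '.') : restSeg (c :: r) = restSeg r := by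
  simp [restSeg, List.dropWhile_cons, hc]

theorem firstSeg_wild (p : List Char) : (firstSeg p = ['*']) ↔ isWildSeg p = true := by
  cases p with
  | nil => simp [firstSeg, isWildSeg]
  | cons c rest =>
    by_cases hc : c = '*'
    · subst hc
      cases rest with
      | nil => simp [firstSeg, isWildSeg, List.takeWhile]
      | cons d r =>
        by_cases hd : d = '.'
        · subst hd
          rw [firstSeg_cons _ _ (by decide), firstSeg_cons_dot]
          simp [isWildSeg]
        · rw [firstSeg_cons _ _ (by decide), firstSeg_cons _ _ hd]
          simp [isWildSeg, hd]
    · rw [firstSeg]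
      by_cases hcd : c = '.'
      · subst hcd
        simp [List.takeWhile, isWildSeg]
      · simp only [List.takeWhile_cons, if_pos, hcd]
        simp [isWildSeg, hc, hcd]

theorem scanGo_eq : ∀ (m p : List Char), scanGo m p =
    ((decide (firstSeg m = firstSeg p)) &&
      (match restSeg m, restSeg p with
       | [], [] => true
       | _ :: m', _ :: p' => scan m' p' true
       | _, _ => false)) := by
  intro m
  induction m with
  | nil =>
    intro p
    cases p with
    | nil => simp [scanGo, firstSeg, restSeg, segsTail]
    | cons c r =>
      rw [show scanGo [] (c :: r) = false from by simp [scanGo]]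
      by_cases hc : c = '.'
      · subst hc
        rw [restSeg_cons_dot]
        simp [firstSeg_cons_dot, firstSeg, restSeg]
      · have hfs : (decide (firstSeg ([] : List Char) = firstSeg (c :: r))) = false := by
          rw [firstSeg_cons _ _ hc]; simp [firstSeg]
        rw [hfs, Bool.false_and]
  | cons mc mr ih =>
    intro p
    cases p with
    | nil =>
      rw [show scanGo (mc :: mr) [] = false from by simp [scanGo]]
      by_cases hm : mc = '.'
      · subst hm
        rw [restSeg_cons_dot]
        simp [firstSeg_cons_dot, firstSeg, restSeg]
      · have hfs : (decide (firstSeg (mc :: mr) = firstSeg ([] : List Char))) = false := by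
          rw [firstSeg_cons _ _ hm]; simp [firstSeg]
        rw [hfs, Bool.false_and]
    | cons pc pr =>
      rw [scanGo]
      by_cases he : mc = pc
      · subst he
        rw [if_pos rfl]
        by_cases hm : mc = '.'
        · subst hm
          simp [firstSeg_cons_dot, restSeg_cons_dot, scan_false]
        · rw [show (decide (mc = '.')) = false by simp [hm]]
          rw [scan_false, ih pr]
          simp [firstSeg_cons _ _ hm, restSeg_cons _ _ hm, hm]
      · rw [if_neg he]
        have hfs : (decide (firstSeg (mc :: mr) = firstSeg (pc :: pr))) = false := by
          by_cases hm : mc = '.' <;> by_cases hp : pc = '.'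
          · exact absurd (hm.trans hp.symm) he
          · subst hm; simp [firstSeg_cons_dot, firstSeg_cons _ _ hp]
          · subst hp; simp [firstSeg_cons_dot, firstSeg_cons _ _ hm]
          · simp [firstSeg_cons _ _ hm, firstSeg_cons _ _ hp, he]
        rw [hfs, Bool.false_and]

theorem firstSeg_shape (p : List Char) (h : firstSeg p = ['*']) : p = '*' :: restSeg p := by
  conv_lhs => rw [← List.takeWhile_append_dropWhile (p := (· ≠ '.')) (l := p)]
  rw [show p.takeWhile (· ≠ '.') = firstSeg p from rfl, h]
  rfl

theorem segMatch_cons_nil (a : List Char) (ps : List (List Char)) : segMatch (a :: ps) [] = false := rfl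
theorem segMatch_nil_cons (a : List Char) (ps : List (List Char)) : segMatch [] (a :: ps) = false := rfl
theorem segMatch_cons_cons (a b : List Char) (ps ms : List (List Char)) :
    segMatch (a :: ps) (b :: ms) = ((decide (a = ['*']) || decide (a = b)) && segMatch ps ms) := rfl

theorem segs_shape (l : List Char) : ∃ x xs, segs [] l = x :: xs := by
  cases hseg : segs [] l with
  | nil => exact absurd hseg (segs_ne_nil _ _)
  | cons a b => exact ⟨a, b, rfl⟩

theorem scan_true_aux : ∀ (N : Nat) (m p : List Char), m.length + p.length ≤ N →
    scan m p true = segMatch (segs [] p) (segs [] m) := by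
  intro N
  induction N with
  | zero =>
    intro m p h
    have hm : m = [] := by cases m <;> simp_all
    have hp : p = [] := by cases p <;> simp_all
    subst hm; subst hp
    rw [scan]
    simp [isWildSeg, scanGo, segs, segMatch]
  | succ N ih =>
    intro m p h
    have hsdm : segs [] m = firstSeg m :: segsTail m := by rw [segs_decomp]; simp
    have hsdp : segs [] p = firstSeg p :: segsTail p := by rw [segs_decomp]; simp
    by_cases hw : isWildSeg p = true
    · have hfp : firstSeg p = ['*'] := (firstSeg_wild p).mpr hw
      have hshape := firstSeg_shape p hfp
      rw [scan, if_pos (by simp [hw]), skipSeg_eq]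
      have htail : p.tail = restSeg p := by
        conv_lhs => rw [hshape]
        rfl
      rw [htail, hsdp, hfp]
      rcases restSeg_cases p with hrp | ⟨r, hrp⟩
      · -- pattern is exactly "*"
        have hstp : segsTail p = [] := by simp [segsTail, hrp]
        rw [hrp, hstp, hsdm]
        rcases restSeg_cases m with hrm | ⟨t, hrm⟩
        · have hstm : segsTail m = [] := by simp [segsTail, hrm]
          rw [hrm, hstm]
          rw [show scanGo [] [] = true from by simp [scanGo]]
          simp [segMatch]
        · have hstm : segsTail m = segs [] t := by simp [segsTail, hrm]
          rw [hrm, hstm]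
          rw [show scanGo ('.' :: t) [] = false from by simp [scanGo]]
          obtain ⟨x, xs, hx⟩ := segs_shape t
          rw [hx, segMatch_cons_cons, segMatch_nil_cons]
          simp
      · -- pattern is '*' '.' …
        have hstp : segsTail p = segs [] r := by simp [segsTail, hrp]
        rw [hrp, hstp, hsdm]
        rcases restSeg_cases m with hrm | ⟨t, hrm⟩
        · have hstm : segsTail m = [] := by simp [segsTail, hrm]
          rw [hrm, hstm]
          rw [show ∀ x xs, scanGo [] (x :: xs) = false from by intro x xs; simp [scanGo]]
          obtain ⟨x, xs, hx⟩ := segs_shape r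
          rw [hx, segMatch_cons_cons, segMatch_cons_nil]
          simp
        · have hstm : segsTail m = segs [] t := by simp [segsTail, hrm]
          rw [hrm, hstm]
          rw [scanGo, if_pos rfl]
          rw [show decide ('.' = '.') = true from by decide]
          have hlt : t.length + r.length ≤ N := by
            have h1 : (restSeg m).length ≤ m.length := restSeg_length_le m
            have h2 : p.length = r.length + 2 := by rw [hshape, hrp]; simp
            rw [hrm] at h1
            simp at h1; omega
          rw [ih t r hlt, segMatch_cons_cons]
          simp
    · have hfp : ¬ (firstSeg p = ['*']) := fun hh => hw ((firstSeg_wild p).mp hh)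
      rw [scan, if_neg (by simp [hw]), scanGo_eq, hsdm, hsdp, segMatch_cons_cons]
      rw [show decide (firstSeg p = ['*']) = false from by simp [hfp], Bool.false_or]
      by_cases hf : firstSeg m = firstSeg p
      · rw [show decide (firstSeg m = firstSeg p) = true from by simp [hf]]
        rw [show decide (firstSeg p = firstSeg m) = true from by simp [hf]]
        simp only [Bool.true_and]
        rcases restSeg_cases m with hrm | ⟨t, hrm⟩ <;> rcases restSeg_cases p with hrp | ⟨r, hrp⟩
        · have hstm : segsTail m = [] := by simp [segsTail, hrm]
          have hstp : segsTail p = [] := by simp [segsTail, hrp]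
          rw [hrm, hrp, hstm, hstp]
          rfl
        · have hstm : segsTail m = [] := by simp [segsTail, hrm]
          have hstp : segsTail p = segs [] r := by simp [segsTail, hrp]
          rw [hrm, hrp, hstm, hstp]
          obtain ⟨x, xs, hx⟩ := segs_shape r
          rw [hx, segMatch_cons_nil]
        · have hstm : segsTail m = segs [] t := by simp [segsTail, hrm]
          have hstp : segsTail p = [] := by simp [segsTail, hrp]
          rw [hrm, hrp, hstm, hstp]
          obtain ⟨x, xs, hx⟩ := segs_shape t
          rw [hx, segMatch_nil_cons]
        · have hstm : segsTail m = segs [] t := by simp [segsTail, hrm]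
          have hstp : segsTail p = segs [] r := by simp [segsTail, hrp]
          rw [hrm, hrp, hstm, hstp]
          have hlt : t.length + r.length ≤ N := by
            have h1 := restSeg_length_le m
            have h2 := restSeg_length_le p
            rw [hrm] at h1; rw [hrp] at h2
            simp at h1 h2; omega
          exact ih t r hlt
      · rw [show decide (firstSeg m = firstSeg p) = false from by simp [hf]]
        rw [show decide (firstSeg p = firstSeg m) = false from by simp; exact fun hh => hf hh.symm]
        simp

theorem scan_true (m p : List Char) : scan m p true = segMatch (segs [] p) (segs [] m) :=
  scan_true_aux (m.length + p.length) m p le_rfl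

theorem ofList_inj (a b : List Char) : String.ofList a = String.ofList b ↔ a = b := by
  constructor
  · intro h
    have := congrArg String.toList h
    simpa using this
  · intro h; rw [h]

theorem loopA_eq : ∀ (ps ms : List (List Char)),
    (if (ps.map String.ofList).length ≠ (ms.map String.ofList).length then false
     else pyLoopA ((ps.map String.ofList).zip (ms.map String.ofList))) = segMatch ps ms := by
  intro ps
  induction ps with
  | nil =>
    intro ms
    cases ms with
    | nil => simp [pyLoopA, segMatch]
    | cons m ms => simp [segMatch_nil_cons]
  | cons p ps ih =>
    intro ms
    cases ms with
    | nil => simp [segMatch_cons_nil]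
    | cons m ms =>
      rw [segMatch_cons_cons]
      by_cases hl : ps.length = ms.length
      · rw [if_neg (by simp [hl])]
        simp only [List.map_cons, List.zip_cons_cons, pyLoopA]
        have hrec : pyLoopA ((ps.map String.ofList).zip (ms.map String.ofList)) = segMatch ps ms := by
          rw [← ih ms, if_neg (by simp [hl])]
        by_cases hstar : p = ['*']
        · rw [if_neg (by simp [hstar, ofList_inj])]
          rw [hrec, hstar]
          simp
        · by_cases heq : p = m
          · rw [if_neg (by simp [heq, ofList_inj])]
            rw [hrec]
            simp [heq]
          · rw [if_pos ?hcond]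
            · rw [show decide (p = ['*']) = false from by simp [hstar]]
              rw [show decide (p = m) = false from by simp [heq]]
              simp
            case hcond =>
              constructor
              · intro hh
                apply hstar
                have h2 : String.ofList p = String.ofList ['*'] := by rw [hh]
                exact (ofList_inj _ _).mp h2
              · intro hh; exact heq ((ofList_inj _ _).mp hh)
      · rw [if_pos (by simp [hl])]
        have hrec : segMatch ps ms = false := by
          rw [← ih ms, if_pos (by simp [hl])]
        rw [hrec]
        simp

theorem splitOn_go_char (fuel : Nat) : ∀ (l cur : List Char) (acc : List (List Char)),
    l.length < fuel →
    PySem.Chars.splitOn.go ['.'] fuel l cur acc = acc.reverse ++ segs cur l := by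
  induction fuel with
  | zero => intro l cur acc h; omega
  | succ f ih =>
    intro l cur acc h
    cases l with
    | nil => simp [PySem.Chars.splitOn.go, segs]
    | cons c rest =>
      rw [PySem.Chars.splitOn.go]
      simp only [List.length_cons, Nat.add_lt_add_iff_right] at h
      by_cases hc : c = '.'
      · subst hc
        rw [if_pos (by simp [List.isPrefixOf])]
        simp only [List.length_singleton, List.drop_succ_cons, List.drop_zero]
        rw [ih rest [] _ h]
        simp [segs]
      · rw [if_neg (by simp [List.isPrefixOf]; exact fun hh => absurd hh.symm hc)]
        rw [ih rest (c :: cur) acc h]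
        simp [segs, hc]

theorem splitOn_char (l : List Char) : PySem.Chars.splitOn l ['.'] = segs [] l := by
  unfold PySem.Chars.splitOn
  exact splitOn_go_char (l.length + 1) l [] [] (by omega)

theorem split_dot (s : String) :
    (PySem.Str.split? s ".").getD [] = (segs [] s.toList).map String.ofList := by
  rw [PySem.Str.split?]
  rw [show PySem.Chars.split? s.toList ".".toList = some (PySem.Chars.splitOn s.toList ['.']) from by
    rw [PySem.Chars.split?]; rfl]
  rw [splitOn_char]
  rfl

theorem main_eq (module_name pattern : String) :
    match_module_pattern module_name pattern = match_module_pattern_alt module_name pattern := by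
  rw [match_module_pattern, match_module_pattern_alt]
  simp only [split_dot]
  rw [loopA_eq, scan_true]

-- ===== VERDICT (by name: the statement is the Claim_ definition above) =====
theorem match_module_pattern_spec : Claim_equal_match_module_pattern := by
  intro module_name pattern _
  exact (main_eq module_name pattern)
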